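-- pv_equiv track=rewrite | github.com/wonhyungLee/auto_upbit | collect_upbit_okx_overlap_daily.py | choose_okx_instruments
-- ===== SOURCE A (Python) =====
-- def choose_okx_instruments(base: str, okx_by_base: dict[str, list[dict]], quote_preference: list[str]) -> dict | None:
--     candidates = okx_by_base.get(base, [])
--     if not candidates:
--         return None
--
--     by_quote = {row.get("instId", "").split("-", 1)[1]: row for row in candidates if "-" in row.get("instId", "")}
--     for q in quote_preference:
--         cand = by_quote.get(q)
--         if cand is not None:
--             return cand
--
--     return sorted(candidates, key=lambda row: row.get("instId", ""))[0] if candidates else None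
-- ===== SOURCE B (Python) =====
-- def choose_okx_instruments(base: str, okx_by_base: dict[str, list[dict]], quote_preference: list[str]) -> dict | None:
--     candidates = okx_by_base.get(base, [])
--     if not candidates:
--         return None
--
--     for q in quote_preference:
--         found = None
--         for row in candidates:
--             inst = row.get("instId", "")
--             if "-" in inst and inst.split("-", 1)[1] == q:
--                 found = row  # keep the LAST match (dict overwrite semantics)
--         if found is not None:
--             return found
--
--     return min(candidates, key=lambda row: row.get("instId", ""))
-- ===== Notes on version B (the rewrite author's own statement) =====
-- stated objective: simpler
-- what changed: Drops the by_quote dict index: for each preferred quote B scans candidates directly keeping the last matching row (replicating dict overwrite), and the fallback is min(candidates, key=instId) instead of sorted(...)[0].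
import Mathlib
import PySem

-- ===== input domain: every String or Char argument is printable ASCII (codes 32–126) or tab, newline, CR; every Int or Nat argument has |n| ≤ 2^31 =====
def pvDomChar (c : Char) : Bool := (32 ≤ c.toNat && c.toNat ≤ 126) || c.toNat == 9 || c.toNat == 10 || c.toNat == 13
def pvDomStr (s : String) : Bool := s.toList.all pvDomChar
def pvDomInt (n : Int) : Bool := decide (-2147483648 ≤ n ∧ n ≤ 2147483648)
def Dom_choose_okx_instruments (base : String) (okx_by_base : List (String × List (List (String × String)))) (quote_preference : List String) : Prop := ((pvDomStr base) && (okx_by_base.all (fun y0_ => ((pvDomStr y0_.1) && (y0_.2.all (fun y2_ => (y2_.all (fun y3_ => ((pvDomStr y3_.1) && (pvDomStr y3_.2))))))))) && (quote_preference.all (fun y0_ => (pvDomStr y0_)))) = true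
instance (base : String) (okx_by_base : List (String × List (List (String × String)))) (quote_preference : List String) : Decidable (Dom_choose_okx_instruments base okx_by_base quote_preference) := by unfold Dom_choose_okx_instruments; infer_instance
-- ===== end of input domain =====

-- B drops A's by_quote dict index (per-quote linear scan keeping the last match, min() instead of
-- sorted(...)[0]); objective: simpler. Equivalence of RETURN values is proved; neither mutates input.

-- ===== PORT A =====
-- shared rendering of Python's `row.get("instId","")` (dict lookup with default)
def pvInstId (row : List (String × String)) : String :=
  (PySem.Dict.mk row).getD "instId" ""

-- shared rendering of the guarded expression `"-" in inst … inst.split("-",1)[1]` appearing in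
-- both Pythons: `some suffix` iff '-' occurs in instId (split("-",1)[1] exists exactly then)
def pvQuote? (row : List (String × String)) : Option String :=
  let inst := pvInstId row
  if PySem.Str.isIn "-" inst then ((PySem.Str.splitMax? inst "-" 1).getD [])[1]? else none

-- the `for q in quote_preference: cand = by_quote.get(q); if cand is not None: return cand` loop
def pvFirstPref (byQuote : PySem.Dict String (List (String × String))) : List String → Option (List (String × String))
  | [] => none
  | q :: qs =>
    match byQuote.get? q with
    | some cand => some cand
    | none => pvFirstPref byQuote qs

def choose_okx_instruments (base : String) (okx_by_base : List (String × List (List (String × String)))) (quote_preference : List String) : Option (List (String × String)) :=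
  let candidates := (PySem.Dict.mk okx_by_base).getD base []
  if candidates = [] then none
  else
    -- the by_quote dict comprehension (insertion with overwrite = last row wins per quote)
    let byQuote := candidates.foldl
      (fun d row => match pvQuote? row with
        | some k => d.insert k row
        | none => d) PySem.Dict.empty
    match pvFirstPref byQuote quote_preference with
    | some cand => some cand
    | none =>
      -- `sorted(candidates, key=…)[0] if candidates else None`; candidates ≠ [] here, so pyGet? is some
      if candidates ≠ [] then PySem.List.pyGet? (PySem.List.sorted candidates pvInstId false) 0
      else none

-- ===== PORT B =====
-- inner `for row in candidates` scan keeping the LAST row whose quote suffix is q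
def pvLastMatch (candidates : List (List (String × String))) (q : String) : Option (List (String × String)) :=
  candidates.foldl (fun acc row => if pvQuote? row == some q then some row else acc) none

-- outer `for q in quote_preference` loop of B
def pvScanPrefs (candidates : List (List (String × String))) : List String → Option (List (String × String))
  | [] => none
  | q :: qs =>
    match pvLastMatch candidates q with
    | some found => some found
    | none => pvScanPrefs candidates qs

def choose_okx_instruments_alt (base : String) (okx_by_base : List (String × List (List (String × String)))) (quote_preference : List String) : Option (List (String × String)) :=
  let candidates := (PySem.Dict.mk okx_by_base).getD base []
  if candidates = [] then none
  else
    match pvScanPrefs candidates quote_preference with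
    | some found => some found
    | none => PySem.List.min? candidates pvInstId

-- ===== PRECONDITION & SPEC =====
def Spec_choose_okx_instruments (base : String) (okx_by_base : List (String × List (List (String × String)))) (quote_preference : List String) (out : Option (List (String × String))) : Prop := out = choose_okx_instruments_alt base okx_by_base quote_preference
instance (base : String) (okx_by_base : List (String × List (List (String × String)))) (quote_preference : List String) (out : Option (List (String × String))) : Decidable (Spec_choose_okx_instruments base okx_by_base quote_preference out) := by unfold Spec_choose_okx_instruments; infer_instance

-- ===== CLAIM (what is proved, stated in full; the proofs are below) =====
def Claim_equal_choose_okx_instruments : Prop := ∀ (base : String) (okx_by_base : List (String × List (List (String × String)))) (quote_preference : List String), Dom_choose_okx_instruments base okx_by_base quote_preference → Spec_choose_okx_instruments base okx_by_base quote_preference (choose_okx_instruments base okx_by_base quote_preference)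

-- ===== LEMMAS AND PROOFS =====

-- scanning with a non-none start: the scan from `none` wins, else the start survives
theorem pv_foldl_scan_init (cands : List (List (String × String))) (q : String) (a : Option (List (String × String))) :
    cands.foldl (fun acc row => if pvQuote? row == some q then some row else acc) a =
      match cands.foldl (fun acc row => if pvQuote? row == some q then some row else acc) none with
      | some r => some r
      | none => a := by
  induction cands generalizing a with
  | nil => simp
  | cons row rest ih =>
    simp only [List.foldl_cons]
    by_cases h : (pvQuote? row == some q) = true
    · rw [if_pos h, if_pos h, ih (some row)]
      cases List.foldl (fun acc row => if (pvQuote? row == some q) = true then some row else acc) none rest with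
      | some r => rfl
      | none => rfl
    · rw [if_neg h, if_neg h]
      exact ih a

-- the dict built by the comprehension answers get? q with the LAST candidate whose quote is q
theorem pv_get_build (cands : List (List (String × String))) (d : PySem.Dict String (List (String × String))) (q : String) :
    (cands.foldl (fun d row => match pvQuote? row with
        | some k => d.insert k row
        | none => d) d).get? q =
      match pvLastMatch cands q with
      | some r => some r
      | none => d.get? q := by
  induction cands generalizing d with
  | nil => simp [pvLastMatch]
  | cons row rest ih =>
    have hlm : pvLastMatch (row :: rest) q =
        match pvLastMatch rest q with
        | some r => some r
        | none => if pvQuote? row == some q then some row else none := by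
      unfold pvLastMatch
      rw [List.foldl_cons]
      exact pv_foldl_scan_init rest q _
    rw [List.foldl_cons, ih, hlm]
    cases hr : pvLastMatch rest q with
    | some r => rfl
    | none =>
      cases hq : pvQuote? row with
      | none => simp only [hq]; rfl
      | some k =>
        simp only [hq]
        by_cases hk : k = q
        · subst hk
          simp [PySem.Dict.get?_insert_self]
        · have hne : (some k == some q) = false := by simpa using hk
          simp only [hne, Bool.false_eq_true, if_false]
          exact PySem.Dict.get?_insert_of_ne d row (Ne.symm hk)

-- hence A's preference loop over the dict equals B's per-quote scan loop
theorem pv_firstPref_eq_scan (cands : List (List (String × String))) (qp : List String) :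
    pvFirstPref (cands.foldl (fun d row => match pvQuote? row with
        | some k => d.insert k row
        | none => d) PySem.Dict.empty) qp = pvScanPrefs cands qp := by
  induction qp with
  | nil => rfl
  | cons q qs ih =>
    simp only [pvFirstPref, pvScanPrefs, pv_get_build cands PySem.Dict.empty q]
    cases hm : pvLastMatch cands q with
    | some r => simp
    | none => simpa [PySem.Dict.get?] using ih

-- the head of the insertion-sort fold is the running minimum
theorem pv_head_foldl_insertBy (key : List (String × String) → String) :
    ∀ (xs : List (List (String × String))) (m : List (String × String)) (t : List (List (String × String))),
    ∃ t', xs.foldl (fun acc x => PySem.List.insertBy (fun a b => decide (key a < key b)) x acc) (m :: t) =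
      (xs.foldl (fun m x => if key x < key m then x else m) m) :: t' := by
  intro xs
  induction xs with
  | nil => exact fun m t => ⟨t, rfl⟩
  | cons x rest ih =>
    intro m t
    simp only [List.foldl_cons, PySem.List.insertBy]
    by_cases h : key x < key m
    · simpa [h] using ih x (m :: t)
    · simpa [h] using ih m (PySem.List.insertBy (fun a b => decide (key a < key b)) x t)

-- min? on a cons is the same running minimum
theorem pv_min?_eq_runfold (key : List (String × String) → String) :
    ∀ (xs : List (List (String × String))) (m : List (String × String)),
    PySem.List.min? (m :: xs) key = some (xs.foldl (fun m x => if key x < key m then x else m) m) := by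
  intro xs
  induction xs with
  | nil => intro m; rfl
  | cons x rest ih =>
    intro m
    by_cases hx : key x < key m
    · have h1 : PySem.List.min? (m :: x :: rest) key = PySem.List.min? (x :: rest) key := by
        unfold PySem.List.min?
        simp only [List.foldl_cons]
        rw [if_pos hx]
      rw [h1, List.foldl_cons]
      show _ = some (List.foldl _ (if key x < key m then x else m) rest)
      rw [if_pos hx]
      exact ih x
    · have h1 : PySem.List.min? (m :: x :: rest) key = PySem.List.min? (m :: rest) key := by
        unfold PySem.List.min?
        simp only [List.foldl_cons]
        rw [if_neg hx]
      rw [h1, List.foldl_cons]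
      show _ = some (List.foldl _ (if key x < key m then x else m) rest)
      rw [if_neg hx]
      exact ih m

-- fallback: sorted(candidates, key)[0] is min(candidates, key) on a non-empty list
theorem pv_sorted_zero_eq_min? (key : List (String × String) → String) (c : List (String × String)) (cs : List (List (String × String))) :
    PySem.List.pyGet? (PySem.List.sorted (c :: cs) key false) 0 = PySem.List.min? (c :: cs) key := by
  rw [PySem.List.sorted_eq_foldl_insertBy]
  simp only [List.foldl_cons]
  have hins : PySem.List.insertBy (fun a b => decide (key a < key b)) c [] = [c] := rfl
  rw [hins]
  obtain ⟨t', ht⟩ := pv_head_foldl_insertBy key cs c []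
  rw [ht, pv_min?_eq_runfold key cs c]
  simp [PySem.List.pyGet?, PySem.List.pyIdx?]

-- ===== VERDICT (by name: the statement is the Claim_ definition above) =====
theorem choose_okx_instruments_spec : Claim_equal_choose_okx_instruments := by
  intro base okx qp _
  show _ = _
  unfold choose_okx_instruments choose_okx_instruments_alt
  cases hc : (PySem.Dict.mk okx).getD base [] with
  | nil => simp
  | cons c cs =>
    simp only [if_neg (by simp : ¬ (c :: cs : List (List (String × String))) = [])]
    rw [pv_firstPref_eq_scan (c :: cs) qp]
    cases pvScanPrefs (c :: cs) qp with
    | some r => rfl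
    | none =>
      simp only []
      rw [if_pos (by simp), pv_sorted_zero_eq_min? pvInstId c cs]
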